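-- pv_equiv track=rewrite | github.com/patmakesapps/LumaKit | core/summarizer.py | _split_point
-- ===== SOURCE A (Python) =====
-- RECENT_TURNS = 10  # keep this many recent turns verbatim
--
-- def _split_point(messages: list[dict]) -> int:
--     """Find the index where recent messages start.
--
--     We want to keep the last RECENT_TURNS user/assistant exchanges,
--     plus any tool messages attached to them.
--     """
--     # Walk backward, counting user+assistant turns
--     turn_count = 0
--     split = len(messages)
--
--     for i in range(len(messages) - 1, 0, -1):
--         role = messages[i].get("role")
--         if role in ("user", "assistant"):
--             turn_count += 1
--             if turn_count >= RECENT_TURNS * 2:  # user + assistant = 2 messages per turn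
--                 split = i
--                 break
--
--     return split
-- ===== SOURCE B (Python) =====
-- RECENT_TURNS = 10  # keep this many recent turns verbatim
--
--
-- def _split_point(messages: list[dict]) -> int:
--     """One forward pass: collect qualifying indices, then pick the
--     (RECENT_TURNS*2)-th from the end, or len(messages) if too few."""
--     idx = [i for i in range(1, len(messages))
--            if messages[i].get("role") in ("user", "assistant")]
--     need = RECENT_TURNS * 2
--     if len(idx) >= need:
--         return idx[len(idx) - need]
--     return len(messages)
-- ===== Notes on version B (the rewrite author's own statement) =====
-- stated objective: alternative
-- what changed: A's backward early-exit scan with a turn counter is replaced by a single forward pass collecting the qualifying indices (role user/assistant, excluding index 0) into a list, then selecting the 20th-from-the-end element or len(messages) if fewer exist.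
import Mathlib
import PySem

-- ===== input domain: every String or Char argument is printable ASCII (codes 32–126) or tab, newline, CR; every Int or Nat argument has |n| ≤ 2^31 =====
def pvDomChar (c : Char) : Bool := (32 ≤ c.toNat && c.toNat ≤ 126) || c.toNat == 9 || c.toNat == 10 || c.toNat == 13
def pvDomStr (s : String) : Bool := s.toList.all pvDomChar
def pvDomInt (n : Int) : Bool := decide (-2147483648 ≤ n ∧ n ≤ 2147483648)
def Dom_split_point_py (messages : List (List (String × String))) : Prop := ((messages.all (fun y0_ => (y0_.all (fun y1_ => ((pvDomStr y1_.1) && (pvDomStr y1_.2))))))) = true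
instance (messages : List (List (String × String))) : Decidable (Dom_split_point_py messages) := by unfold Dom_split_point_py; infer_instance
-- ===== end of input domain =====

-- B replaces A's backward early-exit scan by a forward collect-then-select pass (alternative decomposition, same cost).

-- shared helper: messages[i].get("role") in ("user", "assistant")
-- (dict.get = first-match lookup on the association list; the index i is always
--  in range at every call site, so .getD [] is never observed)
def pvQual (messages : List (List (String × String))) (i : Int) : Bool :=
  let role := ((PySem.List.pyGet? messages i).getD []).lookup "role"
  role == some "user" || role == some "assistant"

-- ===== PORT A =====
-- the backward loop: i runs over range(len(messages)-1, 0, -1); tc = turn_count, split = current split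
def pvGoA (messages : List (List (String × String))) : List Int → Nat → Int → Int
  | [], _, split => split
  | i :: rest, tc, split =>
    if pvQual messages i then
      if tc + 1 ≥ 20 then i else pvGoA messages rest (tc + 1) split
    else pvGoA messages rest tc split

def split_point_py (messages : List (List (String × String))) : Int :=
  pvGoA messages (PySem.List.pyRange ((messages.length : Int) - 1) 0 (-1)) 0 (messages.length : Int)

-- ===== PORT B =====
def split_point_py_alt (messages : List (List (String × String))) : Int :=
  let idx := (PySem.List.pyRange 1 (messages.length : Int) 1).filter (pvQual messages)
  if idx.length ≥ 20 then idx.getD (idx.length - 20) (messages.length : Int)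
  else (messages.length : Int)

-- ===== PRECONDITION & SPEC =====
def Spec_split_point_py (messages : List (List (String × String))) (out : Int) : Prop := out = split_point_py_alt messages
instance (messages : List (List (String × String))) (out : Int) : Decidable (Spec_split_point_py messages out) := by unfold Spec_split_point_py; infer_instance

-- ===== CLAIM (what is proved, stated in full; the proofs are below) =====
def Claim_equal_split_point_py : Prop := ∀ (messages : List (List (String × String))), Dom_split_point_py messages → Spec_split_point_py messages (split_point_py messages)

-- ===== LEMMAS AND PROOFS =====

-- A's loop over any index list S returns the (20 - tc)-th qualifying index of S (1-based), else split
theorem pvGoA_char (messages : List (List (String × String))) (S : List Int) (tc : Nat) (split : Int)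
    (htc : tc < 20) :
    pvGoA messages S tc split = ((S.filter (pvQual messages))[19 - tc]?).getD split := by
  induction S generalizing tc with
  | nil => simp [pvGoA]
  | cons i rest ih =>
    by_cases hq : pvQual messages i
    · simp only [pvGoA, hq, if_true, List.filter_cons_of_pos hq]
      by_cases h20 : tc + 1 ≥ 20
      · have : tc = 19 := by omega
        subst this
        simp
      · simp only [if_neg h20]
        rw [ih (tc + 1) (by omega)]
        have hk : 19 - tc = (19 - (tc + 1)) + 1 := by omega
        rw [hk, List.getElem?_cons_succ]
    · simp only [pvGoA, hq, List.filter_cons_of_neg hq]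
      exact ih tc htc

theorem split_point_py_spec_aux (messages : List (List (String × String))) :
    split_point_py messages = split_point_py_alt messages := by
  unfold split_point_py split_point_py_alt
  rw [PySem.List.pyRange_neg_one_eq_reverse]
  have he : ((0 : Int) + 1) = 1 := by norm_num
  have he2 : ((messages.length : Int) - 1 + 1) = (messages.length : Int) := by ring
  rw [he, he2]
  rw [pvGoA_char messages _ 0 _ (by omega)]
  rw [List.filter_reverse]
  set L := (PySem.List.pyRange 1 (messages.length : Int) 1).filter (pvQual messages) with hL
  by_cases hlen : L.length ≥ 20
  · have h19 : 19 < L.length := by omega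
    rw [List.getElem?_reverse h19]
    have : L.length - 1 - 19 = L.length - 20 := by omega
    rw [this]
    simp only [hlen, if_true]
    rw [List.getD, List.getElem?_eq_getElem (by omega)]
  · have : L.reverse[19 - 0]? = none := by
      apply List.getElem?_eq_none
      simp; omega
    rw [this]
    simp [hlen]

-- ===== VERDICT (by name: the statement is the Claim_ definition above) =====
theorem split_point_py_spec : Claim_equal_split_point_py := by
  intro messages _
  unfold Spec_split_point_py
  exact split_point_py_spec_aux messages
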